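-- pv_equiv track=rewrite | github.com/WiktorDybalski/Python_projects_term1 | Set 4/14.py | func
-- ===== SOURCE A (Python) =====
-- import math
--
-- def primes(num):
--     if num < 2:
--         return False
--     if num == 2 or num == 3:
--         return True
--     if num % 2 == 0 or num % 3 == 0:
--         return False
--     x = 5
--     while x <= math.sqrt(num):
--         if num % x == 0:
--             return False
--         x += 2
--         if num % x == 0:
--             return False
--         x += 4
--     return True
--
-- def func(T, n):
--     counter = 0
--     for i in range(n):
--         flag = False
--         for j in range(n):
--             temp = T[i][j]
--             length = int(math.log10(temp)) + 1
--             M = 0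
--             while temp != 0:
--                 copy_temp = temp
--                 while copy_temp != 0:
--                     if primes(copy_temp):
--                         flag = True
--                     copy_temp //= 10
--                 temp %= 10 ** (length - M)
--                 M += 1
--         if flag:
--             counter += 1
--     if counter == n:
--         return True
--     return False
-- ===== SOURCE B (Python) =====
-- import math
--
-- def primes(num):  # unchanged primality helper from the module
--     if num < 2:
--         return False
--     if num == 2 or num == 3:
--         return True
--     if num % 2 == 0 or num % 3 == 0:
--         return False
--     x = 5
--     while x <= math.sqrt(num):
--         if num % x == 0:
--             return False
--         x += 2
--         if num % x == 0:
--             return False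
--         x += 4
--     return True
--
-- def subvalues(x):
--     # big-endian digit list of x, then every contiguous segment's value
--     ds = []
--     while x > 0:
--         ds.append(x % 10)
--         x //= 10
--     ds.reverse()
--     out = []
--     for a in range(len(ds)):
--         v = 0
--         for d in ds[a:]:
--             v = 10 * v + d
--             out.append(v)
--     return out
--
-- def func(T, n):
--     count = 0
--     for i in range(n):
--         if any(primes(v) for j in range(n) for v in subvalues(T[i][j])):
--             count += 1
--     return count == n
-- ===== Notes on version B (the rewrite author's own statement) =====
-- stated objective: alternative
-- what changed: B replaces A's per-element log10-length computation and nested while-loops over shrinking powers of ten (temp %= 10**(length-M) outside, copy_temp //= 10 inside) by building each element's big-endian digit list once and scanning all contiguous digit segments with a positional accumulator (v = 10*v + d), with the per-row test expressed as any() over the collected segment values; the module's primality helper is reused unchanged.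
import Mathlib
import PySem

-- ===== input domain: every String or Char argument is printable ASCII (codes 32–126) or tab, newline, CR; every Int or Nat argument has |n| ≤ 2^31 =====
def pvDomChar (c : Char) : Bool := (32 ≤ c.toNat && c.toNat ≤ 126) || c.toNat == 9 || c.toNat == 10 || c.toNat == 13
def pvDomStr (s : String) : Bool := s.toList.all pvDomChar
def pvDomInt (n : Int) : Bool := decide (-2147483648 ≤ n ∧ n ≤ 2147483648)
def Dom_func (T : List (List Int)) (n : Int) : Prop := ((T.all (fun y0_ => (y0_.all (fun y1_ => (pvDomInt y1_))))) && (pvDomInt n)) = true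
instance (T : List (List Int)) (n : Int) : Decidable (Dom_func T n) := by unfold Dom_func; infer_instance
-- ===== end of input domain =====

-- B replaces A's log10/power-of-ten mod//floordiv nested while-loops by an explicit digit list
-- per element and a positional-accumulator scan over its contiguous segments (objective: alternative).

-- ===== PORT A =====
-- primality helper `primes` (shared verbatim by both Python versions).
-- `x <= math.sqrt(num)` is ported as `x * x ≤ num`: exact on the domain (num ≤ 2^31, so x ≤ 46341
-- and math.sqrt is correctly rounded there). Fuel bounds the while loop (x grows by 6 each pass,
-- so num.toNat passes always suffice; the fuel-0 branch is unreachable).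
def primesLoop : Nat → Int → Int → Bool
  | 0, _, _ => true
  | f+1, num, x =>
    if x * x ≤ num then
      if PySem.Int.mod num x = 0 then false
      else if PySem.Int.mod num (x+2) = 0 then false
      else primesLoop f num (x+6)
    else true

def primes (num : Int) : Bool :=
  if num < 2 then false
  else if num = 2 ∨ num = 3 then true
  else if PySem.Int.mod num 2 = 0 ∨ PySem.Int.mod num 3 = 0 then false
  else primesLoop num.toNat num 5

-- inner `while copy_temp != 0` of A; fuel copy.toNat+1 suffices for copy ≥ 0 (copy //= 10 shrinks it)
def innerWhile : Nat → Int → Bool → Bool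
  | 0, _, flag => flag
  | f+1, copy, flag =>
    if copy = 0 then flag
    else innerWhile f (PySem.Int.floordiv copy 10) (if primes copy then true else flag)

-- outer `while temp != 0` of A; exponent length - M is taken .toNat (in Python it is never
-- negative when reached: the loop exits once M = length).  Fuel length.toNat+2 suffices.
def outerWhile : Nat → Int → Int → Int → Bool → Bool
  | 0, _, _, _, flag => flag
  | f+1, temp, length, M, flag =>
    if temp = 0 then flag
    else
      let flag' := innerWhile (temp.toNat + 1) temp flag
      outerWhile f (PySem.Int.mod temp ((10:Int) ^ (length - M).toNat)) length (M + 1) flag'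

-- `int(math.log10(temp)) + 1` is ported as Nat.log 10 temp.toNat + 1: exact for 1 ≤ temp ≤ 2^31
-- (CPython's log10 never crosses an integer boundary there); Python raises for temp ≤ 0 (outside Pre_).
def func (T : List (List Int)) (n : Int) : Bool :=
  let counter := (PySem.List.pyRange 0 n 1).foldl (fun counter i =>
    let flag := (PySem.List.pyRange 0 n 1).foldl (fun flag j =>
      let temp := PySem.List.pyGetD (PySem.List.pyGetD T i []) j 0
      let length : Int := (Nat.log 10 temp.toNat : Int) + 1
      outerWhile (length.toNat + 2) temp length 0 flag) false
    if flag then counter + 1 else counter) 0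
  if counter = n then true else false

-- ===== PORT B =====
-- `while x > 0: ds.append(x % 10); x //= 10`; fuel x.toNat+1 suffices for the loop (x shrinks)
def digitsWhile : Nat → Int → List Int → List Int
  | 0, _, ds => ds
  | f+1, x, ds => if x > 0 then digitsWhile f (PySem.Int.floordiv x 10) (ds ++ [PySem.Int.mod x 10]) else ds

-- `v = 0; for d in ds[a:]: v = 10*v + d; out.append(v)` — the collected v's
def segVals : List Int → Int → List Int
  | [], _ => []
  | d :: rest, v => (10 * v + d) :: segVals rest (10 * v + d)

def subvalues (x : Int) : List Int :=
  let ds := (digitsWhile (x.toNat + 1) x []).reverse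
  (List.range ds.length).flatMap (fun a => segVals (ds.drop a) 0)

def func_alt (T : List (List Int)) (n : Int) : Bool :=
  let count := (PySem.List.pyRange 0 n 1).foldl (fun count i =>
    if (PySem.List.pyRange 0 n 1).any (fun j =>
         (subvalues (PySem.List.pyGetD (PySem.List.pyGetD T i []) j 0)).any (fun v => primes v))
    then count + 1 else count) 0
  if count = n then true else false

-- ===== PRECONDITION & SPEC =====
-- Pre_ excludes exactly the inputs where Python A raises: an index i,j < n outside the matrix
-- (IndexError) or an accessed element ≤ 0 (math.log10 ValueError).
def Pre_func (T : List (List Int)) (n : Int) : Prop :=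
  n.toNat ≤ T.length ∧ ∀ r ∈ T.take n.toNat, n.toNat ≤ r.length ∧ ∀ x ∈ r.take n.toNat, 1 ≤ x
instance (T : List (List Int)) (n : Int) : Decidable (Pre_func T n) := by unfold Pre_func; infer_instance

def pvWitness_func : List (List Int) × Int := ([[2, 10], [35, 6]], 2)

def Spec_func (T : List (List Int)) (n : Int) (out : Bool) : Prop := out = func_alt T n
instance (T : List (List Int)) (n : Int) (out : Bool) : Decidable (Spec_func T n out) := by unfold Spec_func; infer_instance

-- ===== CLAIM (what is proved, stated in full; the proofs are below) =====
def Claim_equal_func : Prop := ∀ (T : List (List Int)) (n : Int), Dom_func T n → Pre_func T n → Spec_func T n (func T n)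


-- ===== LEMMAS AND PROOFS =====

-- value of a big-endian digit list under a Horner accumulator (proof-side helper)
def natFold (v : Nat) (l : List Nat) : Nat := l.foldl (fun v d => 10 * v + d) v

-- "some contiguous digit-substring of m is prime" — the common characterisation both ports meet
def SubP (m : Nat) : Prop := ∃ s t : Nat, primes (((m % 10 ^ s) / 10 ^ t : Nat) : Int) = true

theorem primes_cast_zero : primes ((0 : Nat) : Int) = false := rfl

theorem primes_zero : primes (0 : Int) = false := rfl

theorem outerWhile_cast_zero : ∀ (f : Nat) (l M : Int) (flag : Bool), 1 ≤ f →
    outerWhile f ((0 : Nat) : Int) l M flag = flag := by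
  intro f l M flag hf
  cases f with
  | zero => omega
  | succ f => simp [outerWhile]

theorem innerWhile_true : ∀ (f : Nat) (c : Int), innerWhile f c true = true := by
  intro f
  induction f with
  | zero => intro c; rfl
  | succ f ih => intro c; simp [innerWhile, ih]

theorem outerWhile_true : ∀ (f : Nat) (t l M : Int), outerWhile f t l M true = true := by
  intro f
  induction f with
  | zero => intro t l M; rfl
  | succ f ih => intro t l M; simp [outerWhile, innerWhile_true, ih]

theorem foldl_or_any {A : Type} (f : Bool → A → Bool) (g : A → Bool)
    (h1 : ∀ a, f true a = true) (h2 : ∀ a, f false a = g a) :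
    ∀ (l : List A) (init : Bool), l.foldl f init = (init || l.any g) := by
  intro l
  induction l with
  | nil => intro init; simp
  | cons a l ih =>
    intro init
    cases init with
    | true => simp [List.foldl_cons, h1, ih]
    | false => simp [List.foldl_cons, h2, ih]

theorem innerWhile_iff : ∀ (f : Nat) (c : Nat), c < f → ∀ (flag : Bool),
    (innerWhile f (c : Int) flag = true ↔
      flag = true ∨ ∃ t : Nat, primes ((c / 10 ^ t : Nat) : Int) = true) := by
  intro f
  induction f with
  | zero => intro c hc; omega
  | succ f ih =>
    intro c hc flag
    by_cases h0 : c = 0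
    · subst h0
      simp [innerWhile, Nat.zero_div, primes_zero]
    · have hred : innerWhile (f+1) (c : Int) flag
        = innerWhile f ((c / 10 : Nat) : Int) (if primes (c : Int) then true else flag) := by
        simp only [innerWhile]
        rw [if_neg (by exact_mod_cast h0)]
        congr 1
        exact_mod_cast PySem.Int.floordiv_natCast c 10
      have hlt : c / 10 < f :=
        Nat.lt_of_lt_of_le (Nat.div_lt_self (Nat.pos_of_ne_zero h0) (by norm_num)) (by omega)
      rw [hred, ih (c / 10) hlt]
      constructor
      · rintro (hf | ⟨t, ht⟩)
        · cases hp : primes (c : Int) with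
          | true => exact Or.inr ⟨0, by simpa using hp⟩
          | false => rw [hp] at hf; simp at hf; exact Or.inl hf
        · exact Or.inr ⟨t + 1, by rwa [Nat.div_div_eq_div_mul, ← pow_succ'] at ht⟩
      · rintro (hf | ⟨t, ht⟩)
        · left; simp [hf]
        · cases t with
          | zero => left; simp only [pow_zero, Nat.div_one] at ht; simp [ht]
          | succ t =>
            right; exact ⟨t, by rw [Nat.div_div_eq_div_mul, ← pow_succ']; exact ht⟩

theorem outerWhile_iff : ∀ (f : Nat) (m : Nat) (length M : Int) (flag : Bool),
    (length - M).toNat + 2 ≤ f →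
    (outerWhile f (m : Int) length M flag = true ↔
      flag = true ∨ (∃ t : Nat, primes ((m / 10 ^ t : Nat) : Int) = true) ∨
      ∃ s : Nat, s ≤ (length - M).toNat ∧
        ∃ t : Nat, primes (((m % 10 ^ s) / 10 ^ t : Nat) : Int) = true) := by
  intro f
  induction f with
  | zero => intro m length M flag h; omega
  | succ f ih =>
    intro m length M flag h
    by_cases h0 : m = 0
    · subst h0
      simp [outerWhile, Nat.zero_div, Nat.zero_mod, primes_zero]
    · have e1 : PySem.Int.mod ((m : Nat) : Int) ((10 : Int) ^ (length - M).toNat)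
        = ((m % 10 ^ (length - M).toNat : Nat) : Int) := by
        have := PySem.Int.mod_natCast m (10 ^ (length - M).toNat)
        simpa using this
      have hred : outerWhile (f+1) (m : Int) length M flag
        = outerWhile f ((m % 10 ^ (length - M).toNat : Nat) : Int) length (M + 1)
            (innerWhile (m + 1) (m : Int) flag) := by
        simp only [outerWhile]
        rw [if_neg (by exact_mod_cast h0), Int.toNat_natCast, e1]
      by_cases hk0 : (length - M).toNat = 0
      · rw [hred, hk0]
        simp only [pow_zero, Nat.mod_one]
        rw [outerWhile_cast_zero f length (M+1) _ (by omega),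
          innerWhile_iff (m + 1) m (Nat.lt_succ_self m) flag]
        constructor
        · rintro (hf | ⟨t, ht⟩)
          · exact Or.inl hf
          · exact Or.inr (Or.inl ⟨t, ht⟩)
        · rintro (hf | ⟨t, ht⟩ | ⟨s, hs, t, ht⟩)
          · exact Or.inl hf
          · exact Or.inr ⟨t, ht⟩
          · exfalso
            have hs0 : s = 0 := by omega
            rw [hs0, pow_zero, Nat.mod_one, Nat.zero_div, primes_cast_zero] at ht
            exact Bool.false_ne_true ht
      have hfuel : (length - (M + 1)).toNat + 2 ≤ f := by omega
      rw [hred, ih _ length (M + 1) _ hfuel,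
        innerWhile_iff (m + 1) m (Nat.lt_succ_self m) flag]
      have hmod : ∀ s : Nat, s ≤ (length - (M+1)).toNat →
          (m % 10 ^ (length - M).toNat) % 10 ^ s = m % 10 ^ s := by
        intro s hs
        exact Nat.mod_mod_of_dvd m (pow_dvd_pow 10 (by omega))
      constructor
      · rintro ((hf | ⟨t, ht⟩) | ⟨t, ht⟩ | ⟨s, hs, t, ht⟩)
        · exact Or.inl hf
        · exact Or.inr (Or.inl ⟨t, ht⟩)
        · exact Or.inr (Or.inr ⟨(length - M).toNat, le_refl _, t, ht⟩)
        · rw [hmod s hs] at ht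
          exact Or.inr (Or.inr ⟨s, by omega, t, ht⟩)
      · rintro (hf | ⟨t, ht⟩ | ⟨s, hs, t, ht⟩)
        · exact Or.inl (Or.inl hf)
        · exact Or.inl (Or.inr ⟨t, ht⟩)
        · by_cases hsk : s = (length - M).toNat
          · subst hsk; exact Or.inr (Or.inl ⟨t, ht⟩)
          · refine Or.inr (Or.inr ⟨s, by omega, t, ?_⟩)
            rw [hmod s (by omega)]; exact ht

theorem elem_iff (x : Int) (hx : 1 ≤ x) (flag : Bool) :
    (outerWhile (((Nat.log 10 x.toNat : Int) + 1).toNat + 2) x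
        ((Nat.log 10 x.toNat : Int) + 1) 0 flag = true)
    ↔ (flag = true ∨ SubP x.toNat) := by
  have hxm : ((x.toNat : Nat) : Int) = x := Int.toNat_of_nonneg (by omega)
  set m := x.toNat with hm
  have hLpos : ((Nat.log 10 m : Int) + 1).toNat = Nat.log 10 m + 1 := by omega
  have hmlt : m < 10 ^ (Nat.log 10 m + 1) := Nat.lt_pow_succ_log_self (by norm_num) m
  rw [← hxm, outerWhile_iff _ m _ 0 flag (by omega)]
  have hsub : (((Nat.log 10 m : Int) + 1) - 0).toNat = Nat.log 10 m + 1 := by omega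
  rw [hsub]
  constructor
  · rintro (hf | ⟨t, ht⟩ | ⟨s, _, t, ht⟩)
    · exact Or.inl hf
    · refine Or.inr ⟨Nat.log 10 m + 1, t, ?_⟩
      rwa [Nat.mod_eq_of_lt hmlt]
    · exact Or.inr ⟨s, t, ht⟩
  · rintro (hf | ⟨s, t, ht⟩)
    · exact Or.inl hf
    · by_cases hs : s ≤ Nat.log 10 m + 1
      · exact Or.inr (Or.inr ⟨s, hs, t, ht⟩)
      · refine Or.inr (Or.inr ⟨Nat.log 10 m + 1, le_refl _, t, ?_⟩)
        rw [Nat.mod_eq_of_lt hmlt]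
        rwa [Nat.mod_eq_of_lt (lt_of_lt_of_le hmlt (Nat.pow_le_pow_right (by norm_num) (by omega)))] at ht

-- ===== B-side lemmas =====

theorem digitsWhile_append : ∀ (f : Nat) (x : Int) (ds : List Int),
    digitsWhile f x ds = ds ++ digitsWhile f x [] := by
  intro f
  induction f with
  | zero => intro x ds; simp [digitsWhile]
  | succ f ih =>
    intro x ds
    by_cases hx : 0 < x
    · simp only [digitsWhile, if_pos hx]
      rw [ih _ (ds ++ [PySem.Int.mod x 10]), ih _ ([] ++ [PySem.Int.mod x 10])]
      simp
    · simp [digitsWhile, hx]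

theorem digitsWhile_eq : ∀ (f m : Nat), m < f →
    digitsWhile f (m : Int) [] = (Nat.digits 10 m).map (fun (d : Nat) => (d : Int)) := by
  intro f
  induction f with
  | zero => intro m hm; omega
  | succ f ih =>
    intro m hm
    by_cases h0 : m = 0
    · subst h0; simp [digitsWhile]
    · have hpos : (0 : Int) < (m : Int) := by exact_mod_cast Nat.pos_of_ne_zero h0
      simp only [digitsWhile, if_pos hpos]
      have e1 : PySem.Int.floordiv ((m : Nat) : Int) 10 = ((m / 10 : Nat) : Int) := by
        exact_mod_cast PySem.Int.floordiv_natCast m 10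
      have e2 : PySem.Int.mod ((m : Nat) : Int) 10 = ((m % 10 : Nat) : Int) := by
        exact_mod_cast PySem.Int.mod_natCast m 10
      rw [e1, e2, digitsWhile_append,
        ih (m / 10) (Nat.lt_of_lt_of_le (Nat.div_lt_self (Nat.pos_of_ne_zero h0) (by norm_num)) (by omega)),
        Nat.digits_def' (by norm_num : 1 < 10) (Nat.pos_of_ne_zero h0)]
      simp

theorem castFold : ∀ (l : List Nat) (v : Nat),
    (l.map (fun (d : Nat) => (d : Int))).foldl (fun v d => 10 * v + d) (v : Int)
      = ((natFold v l : Nat) : Int) := by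
  intro l
  induction l with
  | nil => intro v; rfl
  | cons d l ih =>
    intro v
    rw [List.map_cons, List.foldl_cons,
      show (10 * (v : Int) + (d : Int)) = ((10 * v + d : Nat) : Int) by push_cast; ring,
      ih (10 * v + d)]
    rfl

theorem segVals_mem : ∀ (l : List Int) (v w : Int),
    w ∈ segVals l v ↔ ∃ k, k < l.length ∧
      w = (l.take (k+1)).foldl (fun v d => 10 * v + d) v := by
  intro l
  induction l with
  | nil => intro v w; simp [segVals]
  | cons d rest ih =>
    intro v w
    simp only [segVals, List.mem_cons, ih]
    constructor
    · rintro (h | ⟨k, hk, hw⟩)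
      · exact ⟨0, by simp, by simpa using h⟩
      · exact ⟨k + 1, by simpa using hk, by simpa using hw⟩
    · rintro ⟨k, hk, hw⟩
      cases k with
      | zero => exact Or.inl (by simpa using hw)
      | succ k => exact Or.inr ⟨k, by simpa using hk, by simpa using hw⟩

theorem natFold_shift : ∀ (l : List Nat) (v : Nat),
    natFold v l = v * 10 ^ l.length + natFold 0 l := by
  intro l
  induction l with
  | nil => intro v; simp [natFold]
  | cons d l ih =>
    intro v
    have h1 : natFold v (d :: l) = natFold (10 * v + d) l := rfl
    have h2 : natFold 0 (d :: l) = natFold d l := by norm_num [natFold]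
    rw [h1, h2, ih (10 * v + d), ih d, List.length_cons]
    ring

theorem natFold_lt_pow : ∀ (l : List Nat), (∀ d ∈ l, d < 10) →
    natFold 0 l < 10 ^ l.length := by
  intro l
  induction l with
  | nil => intro _; simp [natFold]
  | cons d l ih =>
    intro hd
    have h1 : natFold 0 (d :: l) = d * 10 ^ l.length + natFold 0 l := by
      simp only [natFold, List.foldl_cons]
      simpa [natFold] using natFold_shift l d
    rw [h1]
    have h2 : natFold 0 l < 10 ^ l.length := ih (fun e he => hd e (List.mem_cons_of_mem d he))
    have h3 : d < 10 := hd d (List.mem_cons_self)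
    calc d * 10 ^ l.length + natFold 0 l < (d + 1) * 10 ^ l.length := by nlinarith
    _ ≤ 10 ^ (d :: l).length := by
        simp only [List.length_cons, pow_succ]
        nlinarith [pow_pos (show 0 < 10 by norm_num) l.length]

theorem natFold_append (u w : List Nat) :
    natFold 0 (u ++ w) = natFold 0 u * 10 ^ w.length + natFold 0 w := by
  simp only [natFold, List.foldl_append]
  rw [show (List.foldl (fun v d => 10 * v + d) (List.foldl (fun v d => 10 * v + d) 0 u) w : Nat)
    = natFold (natFold 0 u) w from rfl, natFold_shift]
  rfl

theorem natFold_reverse : ∀ (l : List Nat), natFold 0 l.reverse = Nat.ofDigits 10 l := by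
  intro l
  induction l with
  | nil => simp [natFold, Nat.ofDigits_nil]
  | cons d l ih =>
    rw [List.reverse_cons, natFold_append, ih, Nat.ofDigits_cons]
    simp [natFold]
    ring

theorem seg_val_gen (l : List Nat) (hl : ∀ d ∈ l, d < 10) (a k : Nat)
    (ha : a < l.length) (hk : k < l.length - a) :
    natFold 0 ((l.drop a).take (k+1))
      = (natFold 0 l % 10 ^ (l.length - a)) / 10 ^ (l.length - a - (k+1)) := by
  have hsplit : natFold 0 l
      = natFold 0 (l.take a) * 10 ^ (l.length - a) + natFold 0 (l.drop a) := by
    conv_lhs => rw [← List.take_append_drop a l]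
    rw [natFold_append, List.length_drop]
  have hdlt : natFold 0 (l.drop a) < 10 ^ (l.length - a) := by
    have := natFold_lt_pow (l.drop a) (fun d hd => hl d (List.mem_of_mem_drop hd))
    rwa [List.length_drop] at this
  have hw : natFold 0 (l.drop a) = natFold 0 l % 10 ^ (l.length - a) := by
    rw [hsplit, mul_comm, Nat.mul_add_mod, Nat.mod_eq_of_lt hdlt]
  have hlen2 : ((l.drop a).drop (k+1)).length = l.length - a - (k+1) := by
    simp only [List.length_drop]
  have hsplit2 : natFold 0 (l.drop a)
      = natFold 0 ((l.drop a).take (k+1)) * 10 ^ (l.length - a - (k+1))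
        + natFold 0 ((l.drop a).drop (k+1)) := by
    conv_lhs => rw [← List.take_append_drop (k+1) (l.drop a)]
    rw [natFold_append, hlen2]
  have hdlt2 : natFold 0 ((l.drop a).drop (k+1)) < 10 ^ (l.length - a - (k+1)) := by
    have := natFold_lt_pow ((l.drop a).drop (k+1))
      (fun d hd => hl d (List.mem_of_mem_drop (List.mem_of_mem_drop hd)))
    rwa [hlen2] at this
  have hseg : natFold 0 ((l.drop a).take (k+1))
      = natFold 0 (l.drop a) / 10 ^ (l.length - a - (k+1)) := by
    rw [hsplit2, mul_comm, Nat.mul_add_div (by positivity), Nat.div_eq_of_lt hdlt2]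
    omega
  rw [hseg, hw]

theorem subvalues_iff (m : Nat) (hm : 1 ≤ m) :
    ((subvalues (m : Int)).any (fun v => primes v) = true ↔ SubP m) := by
  have hds : digitsWhile (((m : Int)).toNat + 1) (m : Int) []
      = (Nat.digits 10 m).map (fun (d : Nat) => (d : Int)) := by
    rw [Int.toNat_natCast]
    exact digitsWhile_eq (m + 1) m (Nat.lt_succ_self m)
  set bigs : List Nat := (Nat.digits 10 m).reverse with hbigs
  have hdsrev : (digitsWhile (((m : Int)).toNat + 1) (m : Int) []).reverse
      = bigs.map (fun (d : Nat) => (d : Int)) := by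
    rw [hds, hbigs, List.map_reverse]
  have hdig : ∀ d ∈ bigs, d < 10 := by
    intro d hd
    exact Nat.digits_lt_base (by norm_num) (List.mem_reverse.mp hd)
  have hval : natFold 0 bigs = m := by
    rw [hbigs, natFold_reverse, Nat.ofDigits_digits]
  have hmlt : m < 10 ^ bigs.length := by
    rw [← hval]; exact natFold_lt_pow bigs hdig
  have hLB : 1 ≤ bigs.length := by
    rcases Nat.eq_zero_or_pos bigs.length with h | h
    · exfalso
      rw [List.length_eq_zero_iff] at h
      rw [h] at hval
      simp [natFold] at hval
      omega
    · exact h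
  unfold subvalues
  rw [hdsrev]
  rw [List.any_eq_true]
  constructor
  · rintro ⟨v, hv, hp⟩
    rw [List.mem_flatMap] at hv
    obtain ⟨a, hamem, hvseg⟩ := hv
    rw [List.mem_range, List.length_map] at hamem
    rw [segVals_mem] at hvseg
    obtain ⟨k, hk, hveq⟩ := hvseg
    rw [List.length_drop, List.length_map] at hk
    have hdropmap : (bigs.map (fun (d : Nat) => (d : Int))).drop a = (bigs.drop a).map (fun (d : Nat) => (d : Int)) := by
      rw [List.map_drop]
    have htakemap : ((bigs.drop a).map (fun (d : Nat) => (d : Int))).take (k+1)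
        = ((bigs.drop a).take (k+1)).map (fun (d : Nat) => (d : Int)) := by
      rw [List.map_take]
    rw [hdropmap, htakemap] at hveq
    have : v = ((natFold 0 ((bigs.drop a).take (k+1)) : Nat) : Int) := by
      rw [hveq]
      exact_mod_cast castFold ((bigs.drop a).take (k+1)) 0
    rw [this] at hp
    rw [seg_val_gen bigs hdig a k hamem hk, hval] at hp
    exact ⟨bigs.length - a, bigs.length - a - (k+1), hp⟩
  · rintro ⟨s, t, hp⟩
    set s' := min s bigs.length with hs'
    have hms : m % 10 ^ s = m % 10 ^ s' := by
      rcases le_total s bigs.length with h | h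
      · rw [hs', min_eq_left h]
      · rw [hs', min_eq_right h, Nat.mod_eq_of_lt hmlt,
          Nat.mod_eq_of_lt (lt_of_lt_of_le hmlt (Nat.pow_le_pow_right (by norm_num) h))]
    rw [hms] at hp
    have hne : (m % 10 ^ s') / 10 ^ t ≠ 0 := by
      intro h
      rw [h] at hp
      rw [primes_cast_zero] at hp
      exact Bool.false_ne_true hp
    have ht : t < s' := by
      rcases Nat.lt_or_ge t s' with h | hts
      · exact h
      · exact absurd (Nat.div_eq_of_lt (lt_of_lt_of_le (Nat.mod_lt m (by positivity))
          (Nat.pow_le_pow_right (by norm_num) hts))) hne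
    have hs'LB : s' ≤ bigs.length := min_le_right _ _
    refine ⟨((natFold 0 ((bigs.drop (bigs.length - s')).take ((s' - t - 1)+1)) : Nat) : Int), ?_, ?_⟩
    · rw [List.mem_flatMap]
      refine ⟨bigs.length - s', ?_, ?_⟩
      · rw [List.mem_range, List.length_map]; omega
      · rw [segVals_mem]
        refine ⟨s' - t - 1, ?_, ?_⟩
        · rw [List.length_drop, List.length_map]; omega
        · rw [← List.map_drop, ← List.map_take]
          exact (castFold _ 0).symm
    · rw [seg_val_gen bigs hdig _ _ (by omega) (by omega), hval]
      have e1 : bigs.length - (bigs.length - s') = s' := by omega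
      rw [e1]
      have e2 : s' - ((s' - t - 1) + 1) = t := by omega
      rw [e2]
      exact hp


-- ===== VERDICT (by name: the statement is the Claim_ definition above) =====
theorem func_spec : Claim_equal_func := by
  intro T n hDom hPre
  obtain ⟨hlen, hrows⟩ := hPre
  unfold Spec_func func func_alt
  have hcnt : (PySem.List.pyRange 0 n 1).foldl (fun counter i =>
      let flag := (PySem.List.pyRange 0 n 1).foldl (fun flag j =>
        let temp := PySem.List.pyGetD (PySem.List.pyGetD T i []) j 0
        let length : Int := (Nat.log 10 temp.toNat : Int) + 1
        outerWhile (length.toNat + 2) temp length 0 flag) false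
      if flag then counter + 1 else counter) (0 : Int)
    = (PySem.List.pyRange 0 n 1).foldl (fun count i =>
      if (PySem.List.pyRange 0 n 1).any (fun j =>
           (subvalues (PySem.List.pyGetD (PySem.List.pyGetD T i []) j 0)).any (fun v => primes v))
      then count + 1 else count) (0 : Int) := by
    apply PySem.List.foldl_congr_mem
    intro acc i hi
    have hi' := PySem.List.mem_pyRange_one.mp hi
    have hrowflag : (PySem.List.pyRange 0 n 1).foldl (fun flag j =>
        let temp := PySem.List.pyGetD (PySem.List.pyGetD T i []) j 0
        let length : Int := (Nat.log 10 temp.toNat : Int) + 1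
        outerWhile (length.toNat + 2) temp length 0 flag) false
      = (PySem.List.pyRange 0 n 1).any (fun j =>
           (subvalues (PySem.List.pyGetD (PySem.List.pyGetD T i []) j 0)).any (fun v => primes v)) := by
      rw [foldl_or_any _ (fun j =>
          let temp := PySem.List.pyGetD (PySem.List.pyGetD T i []) j 0
          let length : Int := (Nat.log 10 temp.toNat : Int) + 1
          outerWhile (length.toNat + 2) temp length 0 false)
        (fun a => outerWhile_true _ _ _ _) (fun a => rfl)]
      rw [Bool.false_or]
      apply PySem.List.any_congr_mem
      intro j hj
      have hj' := PySem.List.mem_pyRange_one.mp hj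
      -- identify the matrix element and show it is ≥ 1
      have hiT : i.toNat < T.length := by omega
      have hgetrow : PySem.List.pyGetD T i [] = T[i.toNat] :=
        PySem.List.pyGetD_eq_getElem T [] (by omega) (by omega)
      have hrmem : T[i.toNat] ∈ T.take n.toNat := by
        have hlt : i.toNat < (T.take n.toNat).length := by
          simp only [List.length_take]; omega
        have : (T.take n.toNat)[i.toNat]'hlt = T[i.toNat] := List.getElem_take
        exact this ▸ List.getElem_mem hlt
      obtain ⟨hrlen, hrel⟩ := hrows _ hrmem
      have hjr : j.toNat < (T[i.toNat]).length := by omega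
      have hgetx : PySem.List.pyGetD T[i.toNat] j 0 = (T[i.toNat])[j.toNat] :=
        PySem.List.pyGetD_eq_getElem _ 0 (by omega) (by omega)
      have hxmem : (T[i.toNat])[j.toNat] ∈ (T[i.toNat]).take n.toNat := by
        have hlt : j.toNat < ((T[i.toNat]).take n.toNat).length := by
          simp only [List.length_take]; omega
        have : ((T[i.toNat]).take n.toNat)[j.toNat]'hlt = (T[i.toNat])[j.toNat] := List.getElem_take
        exact this ▸ List.getElem_mem hlt
      have hx : 1 ≤ (T[i.toNat])[j.toNat] := hrel _ hxmem
      show (let temp := PySem.List.pyGetD (PySem.List.pyGetD T i []) j 0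
            let length : Int := (Nat.log 10 temp.toNat : Int) + 1
            outerWhile (length.toNat + 2) temp length 0 false)
        = (subvalues (PySem.List.pyGetD (PySem.List.pyGetD T i []) j 0)).any (fun v => primes v)
      simp only [hgetrow, hgetx]
      set x : Int := (T[i.toNat])[j.toNat] with hxdef
      have hxm : ((x.toNat : Nat) : Int) = x := Int.toNat_of_nonneg (by omega)
      apply Bool.coe_iff_coe.mp
      rw [elem_iff x hx false]
      have := subvalues_iff x.toNat (by omega)
      rw [hxm] at this
      rw [this]
      simp
    rw [hrowflag]
  simp only [hcnt]
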